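-- pv_equiv track=rewrite | github.com/MousePotatoDoesStuff/Miniprojects | code_practice_sites/leetcode/2k/2k5/2501.py | numset
-- ===== SOURCE A (Python) =====
-- def numset(L):
--     L.sort()
--     L2 = [L.pop()]
--     while L:
--         e = L.pop()
--         if e != L2[-1]:
--             L2.append(e)
--     return L2
-- ===== SOURCE B (Python) =====
-- def numset(L):
--     seen = set()
--     out = []
--     while L:
--         e = L.pop()
--         if e not in seen:
--             seen.add(e)
--             out.append(e)
--     out.sort(reverse=True)
--     return out
-- ===== Notes on version B (the rewrite author's own statement) =====
-- stated objective: alternative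
-- what changed: Dedup is done by a hash set while draining the list instead of adjacent comparison on a pre-sorted list; the descending sort moves to the end and runs on the already-deduplicated values.
-- outside the precondition, e.g. on numset([]): A raises IndexError, B returns []
import Mathlib
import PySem

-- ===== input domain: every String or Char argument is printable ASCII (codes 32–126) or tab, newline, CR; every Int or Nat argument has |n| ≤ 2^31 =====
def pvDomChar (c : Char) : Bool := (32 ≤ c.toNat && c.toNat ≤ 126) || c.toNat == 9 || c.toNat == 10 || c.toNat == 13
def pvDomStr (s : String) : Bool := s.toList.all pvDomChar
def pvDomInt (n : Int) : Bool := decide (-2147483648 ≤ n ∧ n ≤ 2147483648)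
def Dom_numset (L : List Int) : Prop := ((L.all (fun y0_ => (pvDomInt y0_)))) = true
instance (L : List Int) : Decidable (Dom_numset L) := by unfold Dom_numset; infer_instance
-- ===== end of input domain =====

-- B replaces A's sort-then-adjacent-dedup by a seen-set dedup while draining L, then sorts descending (alternative decomposition).
-- Both Pythons empty the argument L in place; the equivalence proved here is about the RETURN value.

-- ===== PORT A =====
-- the while loop: repeatedly pop e from the (sorted) remainder, append to L2 unless equal to L2[-1]
def numsetALoop : List Int → List Int → List Int
  | [], L2 => L2
  | e :: rest, L2 =>
      numsetALoop rest (if e ≠ PySem.List.pyGetD L2 (-1) 0 then L2 ++ [e] else L2)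

def numset (L : List Int) : List Int :=
  -- L.sort(); then L2 = [L.pop()] pops the last (max); the while loop pops the rest
  -- back-to-front, i.e. iterates over the reverse of the sorted list.
  match (PySem.List.sorted L (fun x => x) false).reverse with
  | [] => []   -- unreachable under Pre_numset: Python raises IndexError on []
  | m :: rest => numsetALoop rest [m]

-- ===== PORT B =====
-- drain L from the end (pop), keeping a seen-set and an output list of first occurrences
def numsetBLoop : List Int → PySem.Set Int → List Int → List Int
  | [], _, out => out
  | e :: rest, seen, out =>
      if e ∈ seen then numsetBLoop rest seen out
      else numsetBLoop rest (PySem.Set.add seen e) (out ++ [e])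

def numset_alt (L : List Int) : List Int :=
  PySem.List.sorted (numsetBLoop L.reverse PySem.Set.empty []) (fun x => x) true

-- ===== PRECONDITION & SPEC =====
-- A pops from the empty list (IndexError) when L = []; Pre_ excludes exactly that input.
def Pre_numset (L : List Int) : Prop := L ≠ []
instance (L : List Int) : Decidable (Pre_numset L) := by unfold Pre_numset; infer_instance
def pvWitness_numset : List Int := [1]

def Spec_numset (L : List Int) (out : List Int) : Prop := out = numset_alt L
instance (L : List Int) (out : List Int) : Decidable (Spec_numset L out) := by unfold Spec_numset; infer_instance

-- ===== CLAIM (what is proved, stated in full; the proofs are below) =====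
def Claim_equal_numset : Prop := ∀ (L : List Int), Dom_numset L → Pre_numset L → Spec_numset L (numset L)

-- ===== LEMMAS AND PROOFS =====

-- every element of a strictly descending list is >= its last element
lemma ge_getLast_of_pairwise_gt : ∀ (acc : List Int) (m : Int),
    acc.Pairwise (· > ·) → acc.getLast? = some m → ∀ x ∈ acc, m ≤ x
  | [], m => by simp
  | a :: t, m => by
    intro hP hl x hx
    cases t with
    | nil =>
      simp at hl hx
      omega
    | cons b u =>
      have hl' : (b :: u).getLast? = some m := by
        simpa [List.getLast?_cons_cons] using hl
      rcases List.mem_cons.mp hx with rfl | hxt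
      · have hmb := ge_getLast_of_pairwise_gt (b :: u) m (List.pairwise_cons.mp hP).2 hl' b (by simp)
        have hxb : x > b := (List.pairwise_cons.mp hP).1 b (by simp)
        omega
      · exact ge_getLast_of_pairwise_gt (b :: u) m (List.pairwise_cons.mp hP).2 hl' x hxt

-- invariant of A's loop: given a descending remainder bounded by acc's last element,
-- the loop preserves strict descent and collects exactly the members
lemma numsetALoop_props (rest : List Int) : ∀ (acc : List Int) (m : Int),
    acc ≠ [] → acc.getLast? = some m → acc.Pairwise (· > ·) →
    (∀ x ∈ rest, x ≤ m) → rest.Pairwise (· ≥ ·) →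
    (numsetALoop rest acc).Pairwise (· > ·) ∧
    (∀ x, x ∈ numsetALoop rest acc ↔ x ∈ acc ∨ x ∈ rest) := by
  induction rest with
  | nil => intro acc m _ _ hP _ _; exact ⟨hP, by simp [numsetALoop]⟩
  | cons e rs ih =>
    intro acc m hne hl hP hle hrest
    have hlast : PySem.List.pyGetD acc (-1) 0 = m := by
      rw [PySem.List.pyGetD_neg_one acc 0 hne]
      have h2 := List.getLast?_eq_some_getLast (l := acc) hne
      rw [hl] at h2
      exact (Option.some.inj h2).symm
    have hem : e ≤ m := hle e (by simp)
    have hrs_pair : rs.Pairwise (· ≥ ·) := (List.pairwise_cons.mp hrest).2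
    have hrs_le_e : ∀ x ∈ rs, x ≤ e := fun x hx => (List.pairwise_cons.mp hrest).1 x hx
    rw [show numsetALoop (e :: rs) acc
        = numsetALoop rs (if e ≠ PySem.List.pyGetD acc (-1) 0 then acc ++ [e] else acc) from rfl,
      hlast]
    by_cases hcase : e = m
    · rw [if_neg (by simp [hcase])]
      subst hcase
      have hm_mem : e ∈ acc := by
        rcases List.getLast?_eq_some_iff.mp hl with ⟨ys, hys⟩
        rw [hys]; simp
      obtain ⟨hP', hmem'⟩ := ih acc e hne hl hP (fun x hx => hrs_le_e x hx) hrs_pair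
      refine ⟨hP', fun x => ?_⟩
      rw [hmem' x]
      simp only [List.mem_cons]
      constructor
      · rintro (h | h)
        · exact Or.inl h
        · exact Or.inr (Or.inr h)
      · rintro (h | rfl | h)
        · exact Or.inl h
        · exact Or.inl hm_mem
        · exact Or.inr h
    · rw [if_pos hcase]
      have helt : e < m := lt_of_le_of_ne hem hcase
      have hge : ∀ x ∈ acc, m ≤ x := ge_getLast_of_pairwise_gt acc m hP hl
      have hP' : (acc ++ [e]).Pairwise (· > ·) := by
        rw [List.pairwise_append]
        refine ⟨hP, by simp, fun x hx y hy => ?_⟩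
        simp at hy
        subst hy
        have := hge x hx
        omega
      obtain ⟨hP'', hmem'⟩ := ih (acc ++ [e]) e (by simp) List.getLast?_concat hP' hrs_le_e hrs_pair
      refine ⟨hP'', fun x => ?_⟩
      rw [hmem' x]
      simp only [List.mem_append, List.mem_cons]
      tauto

-- invariant of B's loop: result is the out-list extended by the unseen members of xs
lemma numsetBLoop_props (xs : List Int) : ∀ (seen out : List Int),
    out.Nodup → (∀ x, x ∈ seen ↔ x ∈ out) →
    (numsetBLoop xs seen out).Nodup ∧
    (∀ x, x ∈ numsetBLoop xs seen out ↔ x ∈ out ∨ x ∈ xs) := by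
  induction xs with
  | nil => intro seen out hnd _; exact ⟨hnd, by simp [numsetBLoop]⟩
  | cons e rs ih =>
    intro seen out hnd hiff
    rw [show numsetBLoop (e :: rs) seen out
        = (if e ∈ seen then numsetBLoop rs seen out
           else numsetBLoop rs (PySem.Set.add seen e) (out ++ [e])) from rfl]
    by_cases hmem : e ∈ seen
    · rw [if_pos hmem]
      obtain ⟨hnd', hmem'⟩ := ih seen out hnd hiff
      refine ⟨hnd', fun x => ?_⟩
      rw [hmem' x]
      simp only [List.mem_cons]
      constructor
      · rintro (h | h)
        · exact Or.inl h
        · exact Or.inr (Or.inr h)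
      · rintro (h | rfl | h)
        · exact Or.inl h
        · exact Or.inl ((hiff x).mp hmem)
        · exact Or.inr h
    · rw [if_neg hmem]
      have hnd2 : (out ++ [e]).Nodup := by
        rw [List.nodup_append]
        refine ⟨hnd, by simp, fun a ha b hb => ?_⟩
        simp at hb
        subst hb
        intro h
        subst h
        exact hmem ((hiff a).mpr ha)
      have hiff2 : ∀ x, x ∈ PySem.Set.add seen e ↔ x ∈ out ++ [e] := by
        intro x
        rw [PySem.Set.mem_add]
        simp [hiff x, or_comm]
      obtain ⟨hnd', hmem'⟩ := ih (PySem.Set.add seen e) (out ++ [e]) hnd2 hiff2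
      refine ⟨hnd', fun x => ?_⟩
      rw [hmem' x]
      simp only [List.mem_append, List.mem_cons]
      tauto

-- ===== VERDICT (by name: the statement is the Claim_ definition above) =====
theorem numset_spec : Claim_equal_numset := by
  intro L _ hpre
  unfold Spec_numset numset numset_alt
  have hsnil : PySem.List.sorted L (fun x => x) false ≠ [] := by
    rw [Ne, PySem.List.sorted_eq_nil_iff]; exact hpre
  rcases hrev : (PySem.List.sorted L (fun x => x) false).reverse with _ | ⟨m, rest⟩
  · exact absurd (by simpa using congrArg List.reverse hrev) hsnil
  · have hdesc : (m :: rest).Pairwise (· ≥ ·) := by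
      rw [← hrev, List.pairwise_reverse]
      exact (PySem.List.sorted_pairwise L (fun x => x)).imp (fun h => h)
    have hA := numsetALoop_props rest [m] m (by simp) (by simp) (by simp)
      (fun x hx => (List.pairwise_cons.mp hdesc).1 x hx) (List.pairwise_cons.mp hdesc).2
    have hB := numsetBLoop_props L.reverse PySem.Set.empty []
      (by simp) (by simp [PySem.Set.empty])
    have hAmem : ∀ x, x ∈ numsetALoop rest [m] ↔ x ∈ L := by
      intro x
      rw [hA.2 x]
      have hms : x ∈ m :: rest ↔ x ∈ L := by
        rw [← hrev, List.mem_reverse, PySem.List.mem_sorted]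
      simp only [List.mem_cons] at hms ⊢
      tauto
    have hBmem : ∀ x, x ∈ numsetBLoop L.reverse PySem.Set.empty [] ↔ x ∈ L := by
      intro x; rw [hB.2 x]; simp
    have hAnd : (numsetALoop rest [m]).Nodup := hA.1.imp ne_of_gt
    have hperm : (numsetALoop rest [m]).Perm (numsetBLoop L.reverse PySem.Set.empty []) := by
      rw [List.perm_ext_iff_of_nodup hAnd hB.1]
      intro x; rw [hAmem x, hBmem x]
    exact (PySem.List.sorted_rev_eq_of_perm_of_pairwise_gt _ _ _ hperm hA.1).symm
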